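-- pv_equiv track=rewrite | github.com/phlalx/algorithms | leetcode/670.maximum-swap.python3.py | f
-- ===== SOURCE A (Python) =====
-- def f(s, k):
--     if k == len(s) - 1:
--         return k, k, k
--     i_max, i, j = f(s, k + 1)
--     if s[k] < s[i_max]:
--         return i_max, k, i_max
--     elif s[k] == s[i_max]:
--         return i_max, i, j
--     else:
--         return k, i, j
-- ===== SOURCE B (Python) =====
-- def f(s, k):
--     n = len(s)
--     i_max = i = j = n - 1
--     for idx in range(n - 2, k - 1, -1):
--         c, m = s[idx], s[i_max]
--         if c < m:
--             i, j = idx, i_max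
--         elif c > m:
--             i_max = idx
--     return i_max, i, j
-- ===== Notes on version B (the rewrite author's own statement) =====
-- stated objective: alternative
-- what changed: Replaces the right-to-left recursion (which unwinds the whole suffix on the call stack) by a single iterative sweep over range(n-2, k-1, -1) maintaining (i_max, i, j) as loop state.
import Mathlib
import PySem

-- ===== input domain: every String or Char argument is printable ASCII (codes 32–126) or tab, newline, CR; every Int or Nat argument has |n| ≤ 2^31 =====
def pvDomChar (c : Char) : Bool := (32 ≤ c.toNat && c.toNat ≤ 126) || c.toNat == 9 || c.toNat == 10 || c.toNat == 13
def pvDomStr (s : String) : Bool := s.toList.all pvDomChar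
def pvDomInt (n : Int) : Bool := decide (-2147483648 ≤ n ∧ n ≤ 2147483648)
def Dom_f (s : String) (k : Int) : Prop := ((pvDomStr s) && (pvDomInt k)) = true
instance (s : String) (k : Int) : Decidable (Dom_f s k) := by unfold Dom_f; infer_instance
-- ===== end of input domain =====

-- B replaces A's stack recursion over the suffix by an iterative countdown loop with
-- (i_max, i, j) as explicit state (objective: alternative decomposition, same cost).

-- ===== PORT A =====
-- literal port of A's recursion; fuel ((len-1)-k).toNat makes it total: inside Pre_f the
-- fuel runs out exactly at the base case k = len-1, so both fallback branches are unreachable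
def fRec (cs : List Char) : Int → Nat → Int × Int × Int
  | k, fuel =>
    if k = (cs.length : Int) - 1 then (k, k, k)
    else
      match fuel with
      | 0 => (k, k, k)          -- unreachable inside Pre_f (Python: infinite recursion)
      | fuel' + 1 =>
        let r := fRec cs (k + 1) fuel'
        match PySem.List.pyGet? cs k, PySem.List.pyGet? cs r.1 with
        | some a, some b =>
          if a < b then (r.1, k, r.1)
          else if a = b then (r.1, r.2.1, r.2.2)
          else (k, r.2.1, r.2.2)
        | _, _ => (k, k, k)     -- unreachable inside Pre_f (Python: IndexError)

def f (s : String) (k : Int) : Int × Int × Int :=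
  fRec s.toList k ((s.toList.length : Int) - 1 - k).toNat

-- ===== PORT B =====
def fStep (cs : List Char) (st : Int × Int × Int) (idx : Int) : Int × Int × Int :=
  match PySem.List.pyGet? cs idx, PySem.List.pyGet? cs st.1 with
  | some c, some m =>
    if c < m then (st.1, idx, st.1)
    else if m < c then (idx, st.2.1, st.2.2)
    else st
  | _, _ => st                 -- unreachable inside Pre_f (Python: IndexError)

def f_alt (s : String) (k : Int) : Int × Int × Int :=
  let cs := s.toList
  let n : Int := (cs.length : Int)
  (PySem.List.pyRange (n - 2) (k - 1) (-1)).foldl (fStep cs) (n - 1, n - 1, n - 1)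

-- ===== PRECONDITION & SPEC =====
-- exactly the inputs where A returns: valid (possibly negative) index k, plus the
-- degenerate pair s = "", k = -1 where A's base case fires immediately
def Pre_f (s : String) (k : Int) : Prop :=
  (-(s.toList.length : Int) ≤ k ∧ k ≤ (s.toList.length : Int) - 1) ∨
    (s.toList.length = 0 ∧ k = -1)
instance (s : String) (k : Int) : Decidable (Pre_f s k) := by unfold Pre_f; infer_instance
def pvWitness_f : String × Int := ("ab", 0)

def Spec_f (s : String) (k : Int) (out : Int × Int × Int) : Prop := out = f_alt s k
instance (s : String) (k : Int) (out : Int × Int × Int) : Decidable (Spec_f s k out) := by unfold Spec_f; infer_instance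

-- ===== CLAIM (what is proved, stated in full; the proofs are below) =====
def Claim_equal_f : Prop := ∀ (s : String) (k : Int), Dom_f s k → Pre_f s k → Spec_f s k (f s k)

-- ===== LEMMAS AND PROOFS =====

-- countdown range grows by one element at its low end
theorem pyRange_neg_one_snoc (a b : Int) (h : b ≤ a) :
    PySem.List.pyRange a (b - 1) (-1) = PySem.List.pyRange a b (-1) ++ [b] := by
  rw [PySem.List.pyRange_neg_one_eq_reverse, PySem.List.pyRange_neg_one_eq_reverse]
  have hb : b - 1 + 1 = b := by ring
  rw [hb, PySem.List.pyRange_one_cons (by omega : b < a + 1)]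
  simp

-- main invariant: A's recursion with exact fuel equals B's fold over the pending
-- countdown range, and the running maximum index stays within [k, len-1]
theorem fRec_eq_foldl (cs : List Char) (fuel : Nat) : ∀ (k : Int),
    -(cs.length : Int) ≤ k → k ≤ (cs.length : Int) - 1 →
    fuel = ((cs.length : Int) - 1 - k).toNat →
    fRec cs k fuel =
      (PySem.List.pyRange ((cs.length : Int) - 2) (k - 1) (-1)).foldl (fStep cs)
        ((cs.length : Int) - 1, (cs.length : Int) - 1, (cs.length : Int) - 1) ∧
    k ≤ (fRec cs k fuel).1 ∧ (fRec cs k fuel).1 ≤ (cs.length : Int) - 1 := by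
  induction fuel with
  | zero =>
    intro k h1 h2 hf
    have hk : k = (cs.length : Int) - 1 := by omega
    subst hk
    rw [fRec, if_pos rfl, PySem.List.pyRange_neg_one_eq_nil (by omega)]
    simp
  | succ fuel' ih =>
    intro k h1 h2 hf
    have hk : ¬ k = (cs.length : Int) - 1 := by omega
    obtain ⟨heq, hlo, hhi⟩ := ih (k + 1) (by omega) (by omega) (by omega)
    rw [add_sub_cancel_right] at heq
    obtain ⟨a, ha⟩ : ∃ a, PySem.List.pyGet? cs k = some a := by
      rcases h : PySem.List.pyGet? cs k with _ | a
      · exfalso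
        have hin := (PySem.List.pyGet?_eq_none_iff cs k).mp h
        simp only [PySem.Raise.InRange] at hin
        omega
      · exact ⟨a, rfl⟩
    obtain ⟨b, hb⟩ : ∃ b, PySem.List.pyGet? cs (fRec cs (k + 1) fuel').1 = some b := by
      rcases h : PySem.List.pyGet? cs (fRec cs (k + 1) fuel').1 with _ | b
      · exfalso
        have hin := (PySem.List.pyGet?_eq_none_iff cs _).mp h
        simp only [PySem.Raise.InRange] at hin
        omega
      · exact ⟨b, rfl⟩
    have hsnoc : PySem.List.pyRange ((cs.length : Int) - 2) (k - 1) (-1) =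
        PySem.List.pyRange ((cs.length : Int) - 2) k (-1) ++ [k] :=
      pyRange_neg_one_snoc _ _ (by omega)
    rw [fRec, if_neg hk, hsnoc, List.foldl_append, ← heq]
    rcases lt_trichotomy a b with hlt | heqab | hgt
    · refine ⟨?_, ?_, ?_⟩ <;> simp [fStep, ha, hb, hlt] <;> omega
    · subst heqab
      refine ⟨?_, ?_, ?_⟩ <;> simp [fStep, ha, hb] <;> omega
    · have h1' : ¬ a < b := lt_asymm hgt
      have h2' : a ≠ b := hgt.ne'
      refine ⟨?_, ?_, ?_⟩ <;> simp [fStep, ha, hb, h1', h2', hgt] <;> omega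

-- ===== VERDICT (by name: the statement is the Claim_ definition above) =====
theorem f_spec : Claim_equal_f := by
  intro s k _ hpre
  unfold Spec_f f f_alt
  rcases hpre with ⟨h1, h2⟩ | ⟨h1, h2⟩
  · exact (fRec_eq_foldl s.toList _ k h1 h2 rfl).1
  · subst h2
    have hnil : s.toList = [] := by simpa using h1
    rw [hnil]
    decide
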